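-- pv_equiv track=rewrite | github.com/Newblimp/advent_of_code_2021_python | 09/vis.py | clean_up_basins
-- ===== SOURCE A (Python) =====
-- def clean_up_basins(field1):
--     cleaned_field = [[(0,0)]]
--     for i in range(len(field1)):
--         append_flag = True
--         for j in range(len(cleaned_field)):
--             if list_overlap(cleaned_field[j],field1[i]):
--                 append_flag = False
--                 for element in field1[i]:
--                     if element not in cleaned_field[j]:
--                         cleaned_field[j].append(element)
--         if append_flag:
--             cleaned_field.append(field1[i])
--     return cleaned_field
--
-- def list_overlap(lst1,lst2):
--     overlap = False
--     for item in lst1: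
--         if item in lst2:
--             overlap = True
--     for item in lst2:
--         if item in lst1:
--             overlap = True
--     return overlap
-- ===== SOURCE B (Python) =====
-- def clean_up_basins(field1):
--     # Inverted index point -> group ids, two phases: decide attachments, then build output.
--     point_groups = {(0, 0): [0]}
--     members = [{(0, 0)}]
--     chunks = [[[(0, 0)]]]
--     for lst in field1:
--         hits = sorted({g for p in lst for g in point_groups.get(p, ())})
--         if not hits:
--             members.append(set())
--             chunks.append([])
--             hits = [len(members) - 1]
--         for g in hits:
--             chunks[g].append(lst)
--             mg = members[g]
--             for p in lst:
--                 if p not in mg: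
--                     mg.add(p)
--                     point_groups.setdefault(p, []).append(g)
--     result = []
--     for parts in chunks:
--         ordered = list(parts[0])
--         seen = set(ordered)
--         for part in parts[1:]:
--             for p in part:
--                 if p not in seen:
--                     seen.add(p)
--                     ordered.append(p)
--         result.append(ordered)
--     return result
-- ===== Notes on version B (the rewrite author's own statement) =====
-- stated objective: faster
-- what changed: B replaces A's scan over all groups with its quadratic list_overlap helper by an inverted index mapping each point to the ids of groups containing it, and splits the work into two phases: an assignment pass that only records which input lists attach to which group (per-group point sets, no ordered output), then an output pass that builds each group's ordered list by deduplicating the concatenation of its chunks.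
import Mathlib
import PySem

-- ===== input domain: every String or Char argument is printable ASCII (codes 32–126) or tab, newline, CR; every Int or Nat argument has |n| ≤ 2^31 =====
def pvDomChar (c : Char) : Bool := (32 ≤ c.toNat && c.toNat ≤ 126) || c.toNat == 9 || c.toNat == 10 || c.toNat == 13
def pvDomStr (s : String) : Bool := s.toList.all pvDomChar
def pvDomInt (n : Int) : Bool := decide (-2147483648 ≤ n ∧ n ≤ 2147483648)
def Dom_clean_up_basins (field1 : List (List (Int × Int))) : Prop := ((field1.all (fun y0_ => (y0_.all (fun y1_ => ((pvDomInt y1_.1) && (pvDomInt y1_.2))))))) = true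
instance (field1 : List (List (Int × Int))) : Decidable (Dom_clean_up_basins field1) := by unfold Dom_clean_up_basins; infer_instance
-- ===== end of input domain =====

-- B replaces A's scan over all groups (list_overlap per group) by an inverted index
-- point -> group ids and splits the work in two phases: an assignment pass recording
-- which input lists attach to which group, then an output pass building each group's
-- ordered list. A mutates its argument's inner lists (merged groups alias them); the
-- equivalence proved here is about the RETURN value only (B does not mutate).

-- ===== PORT A =====
def pvListOverlap (lst1 lst2 : List (Int × Int)) : Bool :=
  let o1 := lst1.foldl (fun ov item => if lst2.contains item then true else ov) false
  lst2.foldl (fun ov item => if lst1.contains item then true else ov) o1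

def pvMergeA (grp lst : List (Int × Int)) : List (Int × Int) :=
  lst.foldl (fun g e => if g.contains e then g else g ++ [e]) grp

def pvFA (lst : List (Int × Int)) (st : List (List (Int × Int)) × Bool) (grp : List (Int × Int)) :
    List (List (Int × Int)) × Bool :=
  if pvListOverlap grp lst then (st.1 ++ [pvMergeA grp lst], false)
  else (st.1 ++ [grp], st.2)

def pvStepA (cleaned : List (List (Int × Int))) (lst : List (Int × Int)) : List (List (Int × Int)) :=
  let st := cleaned.foldl (pvFA lst) ([], true)
  if st.2 then st.1 ++ [lst] else st.1

def clean_up_basins (field1 : List (List (Int × Int))) : List (List (Int × Int)) :=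
  field1.foldl pvStepA [[((0 : Int), (0 : Int))]]

-- ===== PORT B =====
-- hits = sorted({g for p in lst for g in point_groups.get(p, ())})
def pvCollect (pi : PySem.Dict (Int × Int) (List Int)) (lst : List (Int × Int)) : List Int :=
  PySem.List.sorted
    (PySem.Set.ofList (lst.foldl (fun acc p => acc ++ (PySem.Dict.getD pi p [])) []))
    (fun x => x) false

-- xs[g] = f(xs[g]) for an in-range index g
def pvSetIdx {α : Type} (xs : List α) (g : Int) (f : α → α) : List α :=
  xs.mapIdx (fun i x => if (i : Int) = g then f x else x)

-- body of 'for p in lst: if p not in mg: mg.add(p); point_groups.setdefault(p, []).append(g)'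
def pvAddPoint (g : Int)
    (st : PySem.Dict (Int × Int) (List Int) × PySem.Set (Int × Int)) (p : Int × Int) :
    PySem.Dict (Int × Int) (List Int) × PySem.Set (Int × Int) :=
  if PySem.Set.contains st.2 p then st
  else (PySem.Dict.insert st.1 p (PySem.Dict.getD st.1 p [] ++ [g]), PySem.Set.add st.2 p)

-- body of 'for g in hits: …'
def pvHitStep (lst : List (Int × Int))
    (st : PySem.Dict (Int × Int) (List Int) × List (PySem.Set (Int × Int)) × List (List (List (Int × Int))))
    (g : Int) :
    PySem.Dict (Int × Int) (List Int) × List (PySem.Set (Int × Int)) × List (List (List (Int × Int))) :=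
  let chunks' := pvSetIdx st.2.2 g (fun c => c ++ [lst])
  let r := lst.foldl (pvAddPoint g) (st.1, PySem.List.pyGetD st.2.1 g PySem.Set.empty)
  (r.1, pvSetIdx st.2.1 g (fun _ => r.2), chunks')

-- one iteration of 'for lst in field1'
def pvStepB
    (st : PySem.Dict (Int × Int) (List Int) × List (PySem.Set (Int × Int)) × List (List (List (Int × Int))))
    (lst : List (Int × Int)) :
    PySem.Dict (Int × Int) (List Int) × List (PySem.Set (Int × Int)) × List (List (List (Int × Int))) :=
  if (pvCollect st.1 lst).isEmpty then
    [(((st.2.1 ++ [PySem.Set.empty]).length : Int) - 1)].foldl (pvHitStep lst)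
      (st.1, st.2.1 ++ [PySem.Set.empty], st.2.2 ++ [[]])
  else (pvCollect st.1 lst).foldl (pvHitStep lst) st

-- Phase 2 inner body: 'if p not in seen: seen.add(p); ordered.append(p)'
def pvP2Step (os : List (Int × Int) × PySem.Set (Int × Int)) (p : Int × Int) :
    List (Int × Int) × PySem.Set (Int × Int) :=
  if PySem.Set.contains os.2 p then os else (os.1 ++ [p], PySem.Set.add os.2 p)

-- Phase 2: first chunk verbatim, then append the unseen points of later chunks.
def pvPhase2 (parts : List (List (Int × Int))) : List (Int × Int) :=
  match parts with
  | [] => []  -- unreachable: every group carries at least its seed chunk (parts[0] in Python)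
  | p0 :: rest =>
    (rest.foldl (fun os part => part.foldl pvP2Step os) (p0, PySem.Set.ofList p0)).1

def clean_up_basins_alt (field1 : List (List (Int × Int))) : List (List (Int × Int)) :=
  ((field1.foldl pvStepB
      (PySem.Dict.insert PySem.Dict.empty ((0 : Int), (0 : Int)) [(0 : Int)],
       [PySem.Set.ofList [((0 : Int), (0 : Int))]],
       [[[((0 : Int), (0 : Int))]]])).2.2).map pvPhase2

-- ===== PRECONDITION & SPEC =====
def Spec_clean_up_basins (field1 : List (List (Int × Int))) (out : List (List (Int × Int))) : Prop := out = clean_up_basins_alt field1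
instance (field1 : List (List (Int × Int))) (out : List (List (Int × Int))) : Decidable (Spec_clean_up_basins field1 out) := by unfold Spec_clean_up_basins; infer_instance

-- ===== CLAIM (what is proved, stated in full; the proofs are below) =====
def Claim_equal_clean_up_basins : Prop := ∀ (field1 : List (List (Int × Int))), Dom_clean_up_basins field1 → Spec_clean_up_basins field1 (clean_up_basins field1)

-- ===== LEMMAS AND PROOFS =====

-- the coupling invariant between A's list of groups and B's phase-1 state
def pvInvB (cleaned : List (List (Int × Int)))
    (st : PySem.Dict (Int × Int) (List Int) × List (PySem.Set (Int × Int)) × List (List (List (Int × Int)))) : Prop :=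
  st.2.1.length = cleaned.length ∧ st.2.2.length = cleaned.length ∧
  (∀ i, i < cleaned.length →
    pvPhase2 (st.2.2.getD i []) = cleaned.getD i [] ∧
    st.2.2.getD i [] ≠ [] ∧
    (∀ x : Int × Int, x ∈ st.2.1.getD i PySem.Set.empty ↔ x ∈ cleaned.getD i [])) ∧
  (∀ (p : Int × Int) (g : Int), g ∈ PySem.Dict.getD st.1 p [] ↔
    0 ≤ g ∧ g.toNat < cleaned.length ∧ p ∈ st.2.1.getD g.toNat PySem.Set.empty)

theorem pv_foldl_or (l : List (Int × Int)) (P : (Int × Int) → Bool) (b : Bool) :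
    l.foldl (fun ov item => if P item then true else ov) b = (b || l.any P) := by
  induction l generalizing b with
  | nil => simp
  | cons x xs ih =>
    simp only [List.foldl_cons, List.any_cons, ih]
    by_cases hx : P x = true <;> simp [hx]

theorem pv_overlap_iff (lst1 lst2 : List (Int × Int)) :
    pvListOverlap lst1 lst2 = true ↔ ∃ x, x ∈ lst1 ∧ x ∈ lst2 := by
  unfold pvListOverlap
  simp only [pv_foldl_or, Bool.false_or, Bool.or_eq_true, List.any_eq_true]
  constructor
  · rintro (⟨x, hx, hc⟩ | ⟨x, hx, hc⟩)
    · exact ⟨x, hx, by simpa using hc⟩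
    · exact ⟨x, by simpa using hc, hx⟩
  · rintro ⟨x, h1, h2⟩
    exact Or.inl ⟨x, h1, by simpa using h2⟩

theorem pv_mem_mergeA (grp lst : List (Int × Int)) (x : Int × Int) :
    x ∈ pvMergeA grp lst ↔ x ∈ grp ∨ x ∈ lst := by
  induction lst generalizing grp with
  | nil => simp [pvMergeA]
  | cons p rest ih =>
    have : pvMergeA grp (p :: rest) = pvMergeA (if grp.contains p then grp else grp ++ [p]) rest := rfl
    rw [this]
    by_cases hp : p ∈ grp
    · simp only [List.contains_eq_mem, hp, decide_true, if_true, ih]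
      constructor
      · rintro (h | h) <;> tauto
      · rintro (h | h)
        · tauto
        · rcases List.mem_cons.1 h with h | h
          · subst h; tauto
          · tauto
    · simp only [List.contains_eq_mem, hp, decide_false, Bool.false_eq_true, if_false, ih,
        List.mem_append, List.mem_cons]
      tauto

-- closed form of A's inner fold over the groups
theorem pv_foldA (lst : List (Int × Int)) (gs : List (List (Int × Int)))
    (acc : List (List (Int × Int))) (b : Bool) :
    gs.foldl (pvFA lst) (acc, b) =
      (acc ++ gs.map (fun g => if pvListOverlap g lst then pvMergeA g lst else g),
       b && !(gs.any (fun g => pvListOverlap g lst))) := by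
  induction gs generalizing acc b with
  | nil => simp
  | cons g rest ih =>
    by_cases hov : pvListOverlap g lst = true
    · simp [pvFA, hov, ih]
    · simp [pvFA, hov, ih]


-- setIdx / foldl-setIdx toolbox -------------------------------------------------

theorem pv_length_setIdx {α : Type} (xs : List α) (g : Int) (f : α → α) :
    (pvSetIdx xs g f).length = xs.length := by simp [pvSetIdx]

theorem pv_getD_setIdx {α : Type} (xs : List α) (g : Int) (f : α → α) (i : Nat) (d : α)
    (hi : i < xs.length) :
    (pvSetIdx xs g f).getD i d = if (i : Int) = g then f (xs.getD i d) else xs.getD i d := by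
  rw [List.getD_eq_getElem _ _ (by simpa [pv_length_setIdx] using hi),
      List.getD_eq_getElem _ _ hi]
  simp [pvSetIdx]

theorem pv_length_foldl_setIdx {α : Type} (hits : List Int) (c : List α) (f : α → α) :
    (hits.foldl (fun c g => pvSetIdx c g f) c).length = c.length := by
  induction hits generalizing c with
  | nil => rfl
  | cons g rest ih =>
    simp only [List.foldl_cons]
    rw [ih, pv_length_setIdx]

theorem pv_getD_foldl_setIdx {α : Type} (hits : List Int) (hnd : hits.Nodup) (c : List α)
    (f : α → α) (i : Nat) (d : α) (hi : i < c.length) :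
    (hits.foldl (fun c g => pvSetIdx c g f) c).getD i d =
      if (i : Int) ∈ hits then f (c.getD i d) else c.getD i d := by
  induction hits generalizing c with
  | nil => simp
  | cons g rest ih =>
    simp only [List.foldl_cons]
    rw [ih (List.Nodup.of_cons hnd) _ (by simpa [pv_length_setIdx] using hi),
        pv_getD_setIdx _ _ _ _ _ hi]
    have hg : g ∉ rest := by simpa using (List.nodup_cons.1 hnd).1
    by_cases hr : (i : Int) ∈ rest
    · have : (i : Int) ≠ g := fun h => hg (h ▸ hr)
      simp [hr, this, List.mem_cons]
    · by_cases heq : (i : Int) = g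
      · simp [heq, List.mem_cons, hg]
      · simp [hr, heq, List.mem_cons]

theorem pv_setIdx_append_singleton {α : Type} (xs : List α) (y : α) (f : α → α) :
    pvSetIdx (xs ++ [y]) (xs.length : Int) f = xs ++ [f y] := by
  apply List.ext_getElem (by simp [pv_length_setIdx])
  intro i h1 h2
  unfold pvSetIdx
  rw [List.getElem_mapIdx]
  by_cases heq : i = xs.length
  · subst heq
    simp
  · have hi : i < xs.length := by
      have := h2; simp at this; omega
    have hne : (i : Int) ≠ (xs.length : Int) := by exact_mod_cast heq
    simp [hne, List.getElem_append_left, hi]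

theorem pv_getD_append_lt {α : Type} (xs ys : List α) (i : Nat) (d : α) (hi : i < xs.length) :
    (xs ++ ys).getD i d = xs.getD i d := by
  rw [List.getD_eq_getElem _ _ (by simp; omega), List.getD_eq_getElem _ _ hi,
      List.getElem_append_left hi]

theorem pv_getD_append_len {α : Type} (xs : List α) (y : α) (d : α) :
    (xs ++ [y]).getD xs.length d = y := by
  rw [List.getD_eq_getElem _ _ (by simp)]
  simp

-- collect (the inverted-index lookup) ---------------------------------------------

theorem pv_mem_collect (pi : PySem.Dict (Int × Int) (List Int)) (lst : List (Int × Int)) (g : Int) :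
    g ∈ pvCollect pi lst ↔ ∃ p ∈ lst, g ∈ PySem.Dict.getD pi p [] := by
  unfold pvCollect
  rw [PySem.List.mem_sorted, PySem.Set.mem_ofList, PySem.List.foldl_append_eq_flatMap]
  simp [List.mem_flatMap]

theorem pv_nodup_collect (pi : PySem.Dict (Int × Int) (List Int)) (lst : List (Int × Int)) :
    (pvCollect pi lst).Nodup := by
  unfold pvCollect
  exact (PySem.List.sorted_perm _ _ _).symm.nodup (PySem.Set.nodup_ofList _)

-- the per-point loop of the assignment pass --------------------------------------

theorem pv_addfold (g : Int) (lst : List (Int × Int)) (pi : PySem.Dict (Int × Int) (List Int))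
    (s : PySem.Set (Int × Int)) :
    (∀ x : Int × Int, x ∈ (lst.foldl (pvAddPoint g) (pi, s)).2 ↔ x ∈ s ∨ x ∈ lst) ∧
    (∀ (p : Int × Int) (g' : Int), g' ∈ PySem.Dict.getD (lst.foldl (pvAddPoint g) (pi, s)).1 p [] ↔
      g' ∈ PySem.Dict.getD pi p [] ∨ (g' = g ∧ p ∈ lst ∧ p ∉ s)) := by
  induction lst generalizing pi s with
  | nil => simp
  | cons p rest ih =>
    simp only [List.foldl_cons]
    by_cases hc : PySem.Set.contains s p = true
    · have hp : p ∈ s := (PySem.Set.contains_iff _ _).1 hc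
      have hstep : pvAddPoint g (pi, s) p = (pi, s) := if_pos hc
      rw [hstep]
      obtain ⟨ih1, ih2⟩ := ih pi s
      refine ⟨fun x => ?_, fun q g' => ?_⟩
      · rw [ih1 x, List.mem_cons]
        constructor
        · tauto
        · rintro (h | h | h)
          · exact Or.inl h
          · exact Or.inl (h ▸ hp)
          · exact Or.inr h
      · rw [ih2 q g']
        constructor
        · rintro (h | ⟨h1, h2, h3⟩)
          · exact Or.inl h
          · exact Or.inr ⟨h1, List.mem_cons_of_mem _ h2, h3⟩
        · rintro (h | ⟨h1, h2, h3⟩)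
          · exact Or.inl h
          · rcases List.mem_cons.1 h2 with h2 | h2
            · exact absurd (h2 ▸ hp) h3
            · exact Or.inr ⟨h1, h2, h3⟩
    · have hp : p ∉ s := fun h => hc ((PySem.Set.contains_iff _ _).2 h)
      have hstep : pvAddPoint g (pi, s) p =
          (PySem.Dict.insert pi p (PySem.Dict.getD pi p [] ++ [g]), PySem.Set.add s p) :=
        if_neg hc
      rw [hstep]
      obtain ⟨ih1, ih2⟩ := ih (PySem.Dict.insert pi p (PySem.Dict.getD pi p [] ++ [g]))
        (PySem.Set.add s p)
      refine ⟨fun x => ?_, fun q g' => ?_⟩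
      · rw [ih1 x, PySem.Set.mem_add, List.mem_cons]
        tauto
      · rw [ih2 q g', PySem.Dict.getD_insert]
        by_cases hq : q = p
        · subst hq
          rw [if_pos rfl]
          simp only [List.mem_append, List.mem_singleton]
          have hin : q ∈ PySem.Set.add s q := by rw [PySem.Set.mem_add]; right; rfl
          constructor
          · rintro ((h | h) | ⟨h1, h2, h3⟩)
            · exact Or.inl h
            · exact Or.inr ⟨h, List.mem_cons_self, hp⟩
            · exact absurd hin h3
          · rintro (h | ⟨h1, h2, h3⟩)
            · exact Or.inl (Or.inl h)
            · exact Or.inl (Or.inr h1)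
        · rw [if_neg hq]
          constructor
          · rintro (h | ⟨h1, h2, h3⟩)
            · exact Or.inl h
            · have hqs : q ∉ s := fun hs => h3 (by rw [PySem.Set.mem_add]; exact Or.inl hs)
              exact Or.inr ⟨h1, List.mem_cons_of_mem _ h2, hqs⟩
          · rintro (h | ⟨h1, h2, h3⟩)
            · exact Or.inl h
            · rcases List.mem_cons.1 h2 with h2 | h2
              · exact absurd h2 hq
              · refine Or.inr ⟨h1, h2, fun hm => ?_⟩
                rw [PySem.Set.mem_add] at hm
                rcases hm with hm | hm
                · exact h3 hm
                · exact hq hm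

-- phase-2 toolbox ---------------------------------------------------------------

theorem pv_p2chunk (part : List (Int × Int)) (os : List (Int × Int) × PySem.Set (Int × Int))
    (h : ∀ x : Int × Int, x ∈ os.2 ↔ x ∈ os.1) :
    (part.foldl pvP2Step os).1 = pvMergeA os.1 part ∧
    (∀ x : Int × Int, x ∈ (part.foldl pvP2Step os).2 ↔ x ∈ (part.foldl pvP2Step os).1) := by
  induction part generalizing os with
  | nil => exact ⟨rfl, h⟩
  | cons p rest ih =>
    have stepF : (p :: rest).foldl pvP2Step os = rest.foldl pvP2Step (pvP2Step os p) := rfl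
    have stepM : pvMergeA os.1 (p :: rest) =
        pvMergeA (if os.1.contains p then os.1 else os.1 ++ [p]) rest := rfl
    by_cases hp : p ∈ os.1
    · have hc : PySem.Set.contains os.2 p = true := (PySem.Set.contains_iff _ _).2 ((h p).2 hp)
      have hc1 : os.1.contains p = true := by simpa using hp
      rw [stepF, stepM, if_pos hc1, show pvP2Step os p = os from if_pos hc]
      exact ih os h
    · have hc : ¬ PySem.Set.contains os.2 p = true :=
        fun hcc => hp ((h p).1 ((PySem.Set.contains_iff _ _).1 hcc))
      have hc1 : ¬ os.1.contains p = true := by simpa using hp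
      rw [stepF, stepM, if_neg hc1,
          show pvP2Step os p = (os.1 ++ [p], PySem.Set.add os.2 p) from if_neg hc]
      refine ih (os.1 ++ [p], PySem.Set.add os.2 p) ?_
      intro x
      rw [PySem.Set.mem_add]
      simp [h x]

theorem pv_p2fold_S (rest : List (List (Int × Int))) (os : List (Int × Int) × PySem.Set (Int × Int))
    (h : ∀ x : Int × Int, x ∈ os.2 ↔ x ∈ os.1) :
    ∀ x : Int × Int,
      x ∈ (rest.foldl (fun os part => part.foldl pvP2Step os) os).2 ↔
      x ∈ (rest.foldl (fun os part => part.foldl pvP2Step os) os).1 := by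
  induction rest generalizing os with
  | nil => exact h
  | cons part rest' ih =>
    simp only [List.foldl_cons]
    exact ih _ (pv_p2chunk part os h).2

theorem pv_phase2_append (parts : List (List (Int × Int))) (lst : List (Int × Int))
    (hne : parts ≠ []) :
    pvPhase2 (parts ++ [lst]) = pvMergeA (pvPhase2 parts) lst := by
  cases parts with
  | nil => exact absurd rfl hne
  | cons p0 rest =>
    have hS : ∀ x : Int × Int, x ∈ (PySem.Set.ofList p0) ↔ x ∈ p0 :=
      fun x => PySem.Set.mem_ofList _ _
    simp only [List.cons_append, pvPhase2, List.foldl_append, List.foldl_cons, List.foldl_nil]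
    exact (pv_p2chunk lst _ (pv_p2fold_S rest (p0, PySem.Set.ofList p0) hS)).1

-- invariant preservation --------------------------------------------------------

theorem pv_hit_pres (cleaned : List (List (Int × Int)))
    (st : PySem.Dict (Int × Int) (List Int) × List (PySem.Set (Int × Int)) × List (List (List (Int × Int))))
    (lst : List (Int × Int)) (g : Int) (h : pvInvB cleaned st) (h0 : 0 ≤ g)
    (h1 : g.toNat < cleaned.length) :
    pvInvB (pvSetIdx cleaned g (fun c => pvMergeA c lst)) (pvHitStep lst st g) := by
  obtain ⟨len1, len2, hidx, hpi⟩ := h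
  have hg1 : g.toNat < st.2.1.length := len1 ▸ h1
  have hg2 : g.toNat < st.2.2.length := len2 ▸ h1
  have hmg : PySem.List.pyGetD st.2.1 g PySem.Set.empty = st.2.1.getD g.toNat PySem.Set.empty :=
    PySem.List.pyGetD_of_nonneg _ _ h0
  obtain ⟨hr2, hr1⟩ := pv_addfold g lst st.1 (PySem.List.pyGetD st.2.1 g PySem.Set.empty)
  dsimp only [pvInvB, pvHitStep]
  refine ⟨by rw [pv_length_setIdx, pv_length_setIdx, len1],
          by rw [pv_length_setIdx, pv_length_setIdx, len2], ?_, ?_⟩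
  · intro i hi
    have hi' : i < cleaned.length := by simpa [pv_length_setIdx] using hi
    obtain ⟨hph, hne, hmem⟩ := hidx i hi'
    rw [pv_getD_setIdx _ _ _ _ _ (len2 ▸ hi' : i < st.2.2.length),
        pv_getD_setIdx _ _ _ _ _ (len1 ▸ hi' : i < st.2.1.length),
        pv_getD_setIdx _ _ _ _ _ hi']
    by_cases hig : (i : Int) = g
    · have hieq : i = g.toNat := by omega
      rw [if_pos hig, if_pos hig, if_pos hig]
      refine ⟨?_, by simp, ?_⟩
      · rw [pv_phase2_append _ _ hne, hph]
      · intro x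
        rw [hr2 x, pv_mem_mergeA, hmg, ← hieq]
        rw [hmem x]
    · rw [if_neg hig, if_neg hig, if_neg hig]
      exact ⟨hph, hne, hmem⟩
  · intro p g'
    rw [hr1 p g', hpi p g']
    constructor
    · rintro (⟨h0', hlt, hm⟩ | ⟨heq, hplst, hpns⟩)
      · refine ⟨h0', by rw [pv_length_setIdx]; exact hlt, ?_⟩
        rw [pv_getD_setIdx _ _ _ _ _ (len1 ▸ hlt)]
        by_cases he : ((g'.toNat : Int) = g)
        · have hgg : g' = g := by omega
          rw [if_pos he]
          refine (hr2 p).2 (Or.inl ?_)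
          rw [hmg, ← hgg]
          exact hm
        · rw [if_neg he]
          exact hm
      · rw [heq]
        refine ⟨h0, by rw [pv_length_setIdx]; exact h1, ?_⟩
        have hgt : ((g.toNat : Int)) = g := by omega
        rw [pv_getD_setIdx _ _ _ _ _ (len1 ▸ h1), if_pos hgt]
        exact (hr2 p).2 (Or.inr hplst)
    · rintro ⟨h0', hlt0, hm⟩
      have hlt : g'.toNat < cleaned.length := by rwa [pv_length_setIdx] at hlt0
      rw [pv_getD_setIdx _ _ _ _ _ (len1 ▸ hlt)] at hm
      by_cases he : ((g'.toNat : Int) = g)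
      · have hgg : g' = g := by omega
        rw [if_pos he] at hm
        rcases (hr2 p).1 hm with hmm | hml
        · rw [hmg] at hmm
          exact Or.inl ⟨h0', hlt, by rw [hgg]; exact hmm⟩
        · by_cases hms : p ∈ PySem.List.pyGetD st.2.1 g PySem.Set.empty
          · rw [hmg] at hms
            exact Or.inl ⟨h0', hlt, by rw [hgg]; exact hms⟩
          · exact Or.inr ⟨hgg, hml, hms⟩
      · rw [if_neg he] at hm
        exact Or.inl ⟨h0', hlt, hm⟩

theorem pv_setIdx_append_singleton' {α : Type} (xs : List α) (y : α) (f : α → α) (g : Int)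
    (hg : g = (xs.length : Int)) : pvSetIdx (xs ++ [y]) g f = xs ++ [f y] := by
  subst hg; exact pv_setIdx_append_singleton xs y f

theorem pv_seed_pres (cleaned : List (List (Int × Int)))
    (st : PySem.Dict (Int × Int) (List Int) × List (PySem.Set (Int × Int)) × List (List (List (Int × Int))))
    (lst : List (Int × Int)) (h : pvInvB cleaned st) :
    pvInvB (cleaned ++ [lst])
      (pvHitStep lst (st.1, st.2.1 ++ [PySem.Set.empty], st.2.2 ++ [[]]) (cleaned.length : Int)) := by
  obtain ⟨len1, len2, hidx, hpi⟩ := h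
  have hmg : PySem.List.pyGetD (st.2.1 ++ [PySem.Set.empty]) (cleaned.length : Int) PySem.Set.empty
      = PySem.Set.empty := by
    rw [PySem.List.pyGetD_of_nonneg _ _ (by omega)]
    rw [show ((cleaned.length : Int)).toNat = st.2.1.length from by simp [len1]]
    exact pv_getD_append_len _ _ _
  dsimp only [pvInvB, pvHitStep]
  rw [hmg]
  obtain ⟨hr2, hr1⟩ := pv_addfold (cleaned.length : Int) lst st.1 PySem.Set.empty
  rw [pv_setIdx_append_singleton' st.2.1 PySem.Set.empty _ _ (by rw [len1]),
      pv_setIdx_append_singleton' st.2.2 [] _ _ (by rw [len2])]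
  simp only [List.nil_append]
  refine ⟨by simp [len1], by simp [len2], ?_, ?_⟩
  · intro i hi
    have hi1 : i < cleaned.length + 1 := by simpa using hi
    by_cases hlt : i < cleaned.length
    · rw [pv_getD_append_lt st.2.2 _ i [] (len2 ▸ hlt),
          pv_getD_append_lt st.2.1 _ i PySem.Set.empty (len1 ▸ hlt),
          pv_getD_append_lt cleaned _ i [] hlt]
      exact hidx i hlt
    · have hieq : i = cleaned.length := by omega
      have e2 : (st.2.2 ++ [[lst]]).getD i [] = [lst] := by
        rw [hieq, show cleaned.length = st.2.2.length from len2.symm, pv_getD_append_len]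
      have e1 : (st.2.1 ++
          [(lst.foldl (pvAddPoint (cleaned.length : Int)) (st.1, PySem.Set.empty)).2]).getD i
            PySem.Set.empty
          = (lst.foldl (pvAddPoint (cleaned.length : Int)) (st.1, PySem.Set.empty)).2 := by
        rw [hieq, show cleaned.length = st.2.1.length from len1.symm, pv_getD_append_len]
      have e0 : (cleaned ++ [lst]).getD i [] = lst := by
        rw [hieq, pv_getD_append_len]
      rw [e2, e1, e0]
      refine ⟨rfl, by simp, ?_⟩
      intro x
      rw [hr2 x]
      simp [PySem.Set.empty]
  · intro p g'
    rw [hr1 p g', hpi p g']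
    constructor
    · rintro (⟨h0', hlt, hm⟩ | ⟨rfl, hplst, -⟩)
      · refine ⟨h0', by simp; omega, ?_⟩
        rw [pv_getD_append_lt st.2.1 _ _ PySem.Set.empty (len1 ▸ hlt)]
        exact hm
      · refine ⟨by omega, by simp, ?_⟩
        rw [show ((cleaned.length : Int)).toNat = st.2.1.length from by simp [len1],
            pv_getD_append_len]
        exact (hr2 p).2 (Or.inr hplst)
    · rintro ⟨h0', hlt0, hm⟩
      have hlt1 : g'.toNat < st.2.1.length + 1 := by
        simp only [List.length_append, List.length_cons, List.length_nil] at hlt0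
        omega
      by_cases hl : g'.toNat < st.2.1.length
      · rw [pv_getD_append_lt st.2.1 _ _ PySem.Set.empty hl] at hm
        exact Or.inl ⟨h0', len1 ▸ hl, hm⟩
      · have hieq : g'.toNat = st.2.1.length := by omega
        rw [hieq, pv_getD_append_len] at hm
        rcases (hr2 p).1 hm with hmm | hml
        · exact absurd hmm (by simp [PySem.Set.empty])
        · refine Or.inr ⟨?_, hml, by simp [PySem.Set.empty]⟩
          have := len1
          omega

theorem pv_hits_fold (hits : List Int) (cleaned : List (List (Int × Int)))
    (st : PySem.Dict (Int × Int) (List Int) × List (PySem.Set (Int × Int)) × List (List (List (Int × Int))))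
    (lst : List (Int × Int)) (h : pvInvB cleaned st)
    (hv : ∀ g ∈ hits, 0 ≤ g ∧ g.toNat < cleaned.length) :
    pvInvB (hits.foldl (fun c g => pvSetIdx c g (fun x => pvMergeA x lst)) cleaned)
      (hits.foldl (pvHitStep lst) st) := by
  induction hits generalizing cleaned st with
  | nil => exact h
  | cons g rest ih =>
    simp only [List.foldl_cons]
    obtain ⟨hg0, hg1⟩ := hv g List.mem_cons_self
    refine ih _ _ (pv_hit_pres _ _ _ _ ⟨?_, ?_, ?_, ?_⟩ hg0 hg1) ?_
    · exact h.1
    · exact h.2.1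
    · exact h.2.2.1
    · exact h.2.2.2
    · intro g' hg'
      rw [pv_length_setIdx]
      exact hv g' (List.mem_cons_of_mem _ hg')

theorem pv_step_pres (cleaned : List (List (Int × Int)))
    (st : PySem.Dict (Int × Int) (List Int) × List (PySem.Set (Int × Int)) × List (List (List (Int × Int))))
    (lst : List (Int × Int)) (h : pvInvB cleaned st) :
    pvInvB (pvStepA cleaned lst) (pvStepB st lst) := by
  obtain ⟨len1, len2, hidx, hpi⟩ := h
  have hcoll : ∀ g : Int, g ∈ pvCollect st.1 lst ↔
      0 ≤ g ∧ g.toNat < cleaned.length ∧ pvListOverlap (cleaned.getD g.toNat []) lst = true := by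
    intro g
    rw [pv_mem_collect]
    constructor
    · rintro ⟨p, hp, hg⟩
      obtain ⟨h0', hlt, hm⟩ := (hpi p g).1 hg
      refine ⟨h0', hlt, ?_⟩
      rw [pv_overlap_iff]
      exact ⟨p, ((hidx g.toNat hlt).2.2 p).1 hm, hp⟩
    · rintro ⟨h0', hlt, hov⟩
      rw [pv_overlap_iff] at hov
      obtain ⟨x, hx1, hx2⟩ := hov
      exact ⟨x, hx2, (hpi x g).2 ⟨h0', hlt, ((hidx g.toNat hlt).2.2 x).2 hx1⟩⟩
  have hstepA : pvStepA cleaned lst =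
      if cleaned.any (fun g => pvListOverlap g lst) then
        cleaned.map (fun g => if pvListOverlap g lst then pvMergeA g lst else g)
      else cleaned.map (fun g => if pvListOverlap g lst then pvMergeA g lst else g) ++ [lst] := by
    unfold pvStepA
    rw [pv_foldA]
    by_cases hany : cleaned.any (fun g => pvListOverlap g lst) <;> simp [hany]
  by_cases he : (pvCollect st.1 lst).isEmpty
  · have hnil : pvCollect st.1 lst = [] := List.isEmpty_iff.1 he
    have hnov : ∀ (i : Nat) (hi : i < cleaned.length), ¬ pvListOverlap (cleaned[i]'hi) lst = true := by
      intro i hi hov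
      have : (i : Int) ∈ pvCollect st.1 lst := (hcoll _).2 ⟨Int.natCast_nonneg i,
        by simpa using hi, by rw [show (i : Int).toNat = i from by omega,
          List.getD_eq_getElem _ _ hi]; exact hov⟩
      rw [hnil] at this
      exact absurd this List.not_mem_nil
    have hany : cleaned.any (fun g => pvListOverlap g lst) = false := by
      rw [List.any_eq_false]
      intro x hx
      obtain ⟨i, hi, rfl⟩ := List.mem_iff_getElem.1 hx
      exact hnov i hi
    have hmap : cleaned.map (fun g => if pvListOverlap g lst then pvMergeA g lst else g)
        = cleaned := by
      refine List.ext_getElem (by simp) ?_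
      intro i h1 h2
      rw [List.getElem_map, if_neg (hnov i h2)]
    unfold pvStepB
    rw [if_pos he, hstepA, hany, if_neg (by simp), hmap]
    have hlen : ((st.2.1 ++ [PySem.Set.empty]).length : Int) - 1 = (cleaned.length : Int) := by
      simp [len1]
    simp only [List.foldl_cons, List.foldl_nil, hlen]
    exact pv_seed_pres cleaned st lst ⟨len1, len2, hidx, hpi⟩
  · have hne : pvCollect st.1 lst ≠ [] := fun hh => he (by rw [hh]; rfl)
    obtain ⟨g0, hg0⟩ := List.exists_mem_of_ne_nil _ hne
    have hany : cleaned.any (fun g => pvListOverlap g lst) = true := by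
      obtain ⟨h0', hlt, hov⟩ := (hcoll g0).1 hg0
      rw [List.any_eq_true]
      refine ⟨cleaned[g0.toNat]'hlt, List.getElem_mem _, ?_⟩
      rwa [List.getD_eq_getElem _ _ hlt] at hov
    unfold pvStepB
    rw [if_neg (by simp [he]), hstepA, hany, if_pos rfl]
    have hv : ∀ g ∈ pvCollect st.1 lst, 0 ≤ g ∧ g.toNat < cleaned.length :=
      fun g hg => ⟨((hcoll g).1 hg).1, ((hcoll g).1 hg).2.1⟩
    have hfold := pv_hits_fold (pvCollect st.1 lst) cleaned st lst ⟨len1, len2, hidx, hpi⟩ hv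
    have heq : (pvCollect st.1 lst).foldl
        (fun c g => pvSetIdx c g (fun x => pvMergeA x lst)) cleaned
        = cleaned.map (fun g => if pvListOverlap g lst then pvMergeA g lst else g) := by
      refine List.ext_getElem (by rw [pv_length_foldl_setIdx]; simp) ?_
      intro i h1 h2
      have hi : i < cleaned.length := by rwa [pv_length_foldl_setIdx] at h1
      have hgd := pv_getD_foldl_setIdx (pvCollect st.1 lst) (pv_nodup_collect _ _) cleaned
        (fun x => pvMergeA x lst) i [] hi
      rw [List.getD_eq_getElem _ _ h1, List.getD_eq_getElem _ _ hi] at hgd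
      rw [List.getElem_map, hgd]
      have hmemiff : ((i : Int) ∈ pvCollect st.1 lst) ↔ pvListOverlap (cleaned[i]'hi) lst = true := by
        rw [hcoll]
        constructor
        · rintro ⟨-, -, hov⟩
          rwa [show (i : Int).toNat = i from by omega, List.getD_eq_getElem _ _ hi] at hov
        · intro hov
          exact ⟨Int.natCast_nonneg i, by simpa using hi,
            by rw [show (i : Int).toNat = i from by omega, List.getD_eq_getElem _ _ hi]; exact hov⟩
      by_cases hov : pvListOverlap (cleaned[i]'hi) lst = true
      · rw [if_pos (hmemiff.2 hov), if_pos hov]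
      · rw [if_neg (fun hmm => hov (hmemiff.1 hmm)), if_neg hov]
    rw [heq] at hfold
    exact hfold

theorem pv_main (field1 : List (List (Int × Int))) (cleaned : List (List (Int × Int)))
    (st : PySem.Dict (Int × Int) (List Int) × List (PySem.Set (Int × Int)) × List (List (List (Int × Int))))
    (h : pvInvB cleaned st) :
    pvInvB (field1.foldl pvStepA cleaned) (field1.foldl pvStepB st) := by
  induction field1 generalizing cleaned st with
  | nil => exact h
  | cons lst rest ih => exact ih _ _ (pv_step_pres _ _ _ h)

theorem pv_init : pvInvB [[((0 : Int), (0 : Int))]]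
    (PySem.Dict.insert PySem.Dict.empty ((0 : Int), (0 : Int)) [(0 : Int)],
     [PySem.Set.ofList [((0 : Int), (0 : Int))]],
     [[[((0 : Int), (0 : Int))]]]) := by
  refine ⟨rfl, rfl, ?_, ?_⟩
  · intro i hi
    have : i = 0 := by simpa using hi
    subst this
    refine ⟨rfl, by simp, ?_⟩
    intro x
    simp [PySem.Set.mem_ofList]
  · intro p g
    rw [PySem.Dict.getD_insert]
    by_cases hp : p = ((0 : Int), (0 : Int))
    · rw [if_pos hp]
      constructor
      · intro hg
        have hg0 : g = 0 := by simpa using hg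
        subst hg0
        exact ⟨le_refl _, by simp, by simp [hp, PySem.Set.mem_ofList]⟩
      · rintro ⟨h0', hlt, -⟩
        have : g = 0 := by
          simp at hlt
          omega
        simp [this]
    · rw [if_neg hp]
      constructor
      · intro hg
        simp at hg
      · rintro ⟨h0', hlt, hm⟩
        have hg0 : g.toNat = 0 := by
          simp at hlt
          omega
        rw [hg0] at hm
        simp [PySem.Set.mem_ofList] at hm
        exact absurd hm hp

-- ===== VERDICT (by name: the statement is the Claim_ definition above) =====
theorem clean_up_basins_spec : Claim_equal_clean_up_basins := by
  intro field1 _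
  unfold Spec_clean_up_basins clean_up_basins clean_up_basins_alt
  obtain ⟨l1, l2, hidx, -⟩ := pv_main field1 _ _ pv_init
  refine List.ext_getElem (by rw [List.length_map, l2]) ?_
  intro i h1 h2
  rw [List.getElem_map]
  obtain ⟨hp, -, -⟩ := hidx i h1
  rw [List.getD_eq_getElem _ _ (by omega), List.getD_eq_getElem _ _ h1] at hp
  exact hp.symm
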